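-- pv_equiv track=rewrite | github.com/peakchang/pyauto-use | blog_auto_server_mix/func.py | replace_img_line_with_files
-- ===== SOURCE A (Python) =====
-- def replace_img_line_with_files(contentArr, file_list):
--     """
--     주어진 리스트에서 'img_line' 문자열을 'img_line|파일명'으로 대체합니다.
--
--     :param contentArr: 원본 리스트
--     :param file_list: 대체할 파일명 리스트
--     :return: 대체된 새로운 리스트
--     """
--     resultArr = []
--     file_index = 0
--
--     for element in contentArr:
--         if element == "img_line" and file_index < len(file_list):
--             # 'img_line'을 'img_line|파일명'으로 대체
--             resultArr.append(f"img_line|{file_list[file_index]}")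
--             file_index += 1
--         else:
--             # 'img_line'이 아니거나 파일명이 부족한 경우 원래 값을 유지
--             resultArr.append(element)
--
--     return resultArr
-- ===== SOURCE B (Python) =====
-- def replace_img_line_with_files(contentArr, file_list):
--     positions = [i for i, e in enumerate(contentArr) if e == "img_line"]
--     result = list(contentArr)
--     for fn, i in zip(file_list, positions):
--         result[i] = f"img_line|{fn}"
--     return result
-- ===== Notes on version B (the rewrite author's own statement) =====
-- stated objective: alternative
-- what changed: B first collects the indices of 'img_line' markers in one pass, then patches a shallow copy of contentArr in place over zip(file_list, positions), instead of A's single interleaved loop that rebuilds the list with a manual file counter.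
import Mathlib
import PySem

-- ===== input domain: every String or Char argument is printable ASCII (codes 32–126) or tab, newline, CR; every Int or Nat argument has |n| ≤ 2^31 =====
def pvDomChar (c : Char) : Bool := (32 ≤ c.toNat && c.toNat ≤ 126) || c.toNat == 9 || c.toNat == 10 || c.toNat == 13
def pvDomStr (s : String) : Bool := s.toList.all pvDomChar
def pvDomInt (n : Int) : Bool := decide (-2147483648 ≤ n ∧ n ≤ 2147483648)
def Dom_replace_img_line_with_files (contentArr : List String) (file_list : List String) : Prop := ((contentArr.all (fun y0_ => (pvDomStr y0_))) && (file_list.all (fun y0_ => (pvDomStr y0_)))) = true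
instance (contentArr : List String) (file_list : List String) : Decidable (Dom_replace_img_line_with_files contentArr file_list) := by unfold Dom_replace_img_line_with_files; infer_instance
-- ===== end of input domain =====

-- B replaces A's single interleaved loop with a counter by two passes: collect marker
-- positions, then patch a copy over zip(file_list, positions) (objective: alternative decomposition).

-- ===== PORT A =====
-- single pass: rebuild the list, consuming file_list via a counter
def replace_img_line_with_files (contentArr : List String) (file_list : List String) : List String :=
  (contentArr.foldl (fun (st : List String × Nat) element =>
      if element == "img_line" && decide (st.2 < file_list.length) then
        (st.1 ++ ["img_line|" ++ file_list.getD st.2 ""], st.2 + 1)   -- guarded: st.2 < len, so getD is exact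
      else
        (st.1 ++ [element], st.2))
    ([], 0)).1

-- ===== PORT B =====
-- two passes: positions of "img_line", then patch a copy of contentArr over the zip
def replace_img_line_with_files_alt (contentArr : List String) (file_list : List String) : List String :=
  let positions := ((PySem.List.enumerate contentArr).filter (fun p => p.2 == "img_line")).map (fun p => p.1)
  (file_list.zip positions).foldl (fun res fp => res.set fp.2.toNat ("img_line|" ++ fp.1)) contentArr
  -- indices come from enumerate, hence nonnegative and in range: List.set at .toNat is exact here

-- ===== PRECONDITION & SPEC =====
def Spec_replace_img_line_with_files (contentArr : List String) (file_list : List String) (out : List String) : Prop := out = replace_img_line_with_files_alt contentArr file_list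
instance (contentArr : List String) (file_list : List String) (out : List String) : Decidable (Spec_replace_img_line_with_files contentArr file_list out) := by unfold Spec_replace_img_line_with_files; infer_instance

-- ===== CLAIM (what is proved, stated in full; the proofs are below) =====
def Claim_equal_replace_img_line_with_files : Prop := ∀ (contentArr : List String) (file_list : List String), Dom_replace_img_line_with_files contentArr file_list → Spec_replace_img_line_with_files contentArr file_list (replace_img_line_with_files contentArr file_list)

-- ===== LEMMAS AND PROOFS =====

-- reference recursion both ports are reduced to: consume file_list like a queue
def pvCore (xs fs : List String) : List String :=
  match xs with
  | [] => []
  | x :: xs' =>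
    if x = "img_line" then
      match fs with
      | [] => x :: pvCore xs' []
      | f :: fs' => ("img_line|" ++ f) :: pvCore xs' fs'
    else x :: pvCore xs' fs

theorem pvCore_nil (xs : List String) : pvCore xs [] = xs := by
  induction xs with
  | nil => rfl
  | cons x xs ih => simp [pvCore, ih]

theorem pvA_core (file_list : List String) : ∀ (xs acc : List String) (i : Nat),
    (xs.foldl (fun (st : List String × Nat) element =>
      if element == "img_line" && decide (st.2 < file_list.length) then
        (st.1 ++ ["img_line|" ++ file_list.getD st.2 ""], st.2 + 1)
      else
        (st.1 ++ [element], st.2))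
    (acc, i)).1 = acc ++ pvCore xs (file_list.drop i) := by
  intro xs
  induction xs with
  | nil => intro acc i; simp [pvCore]
  | cons x xs ih =>
    intro acc i
    by_cases hx : x = "img_line"
    · by_cases hi : i < file_list.length
      · have hdrop : file_list.drop i = file_list[i] :: file_list.drop (i + 1) :=
          (List.drop_eq_getElem_cons hi)
        simp only [List.foldl_cons, hx, hi, decide_true, Bool.and_self, if_true, beq_self_eq_true,
          ih]
        rw [hdrop]
        simp [pvCore, List.getD_eq_getElem?_getD, List.getElem?_eq_getElem hi]
      · have hdrop : file_list.drop i = [] := List.drop_eq_nil_of_le (by omega)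
        subst hx
        simp only [List.foldl_cons, hi, decide_false, Bool.and_false, ih]
        simp [hdrop, pvCore, pvCore_nil]
    · simp only [List.foldl_cons, ih]
      simp [pvCore, hx]

theorem pvB_core : ∀ (xs fs pref : List String),
    (fs.zip (((PySem.List.enumerate xs (pref.length : Int)).filter (fun p => p.2 == "img_line")).map (fun p => p.1))).foldl
      (fun res fp => res.set fp.2.toNat ("img_line|" ++ fp.1)) (pref ++ xs)
    = pref ++ pvCore xs fs := by
  intro xs
  induction xs with
  | nil => intro fs pref; simp [PySem.List.enumerate, pvCore]
  | cons x xs ih =>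
    intro fs pref
    rw [PySem.List.enumerate_cons]
    by_cases hx : x = "img_line"
    · subst hx
      cases fs with
      | nil => simp [pvCore, pvCore_nil]
      | cons f fs' =>
        simp only [List.filter_cons, beq_self_eq_true, if_true, List.map_cons,
          List.zip_cons_cons, List.foldl_cons]
        have hset : (pref ++ "img_line" :: xs).set (Int.toNat (pref.length : Int)) ("img_line|" ++ f)
            = (pref ++ [("img_line|" ++ f)]) ++ xs := by
          simp [List.append_assoc]
        rw [hset]
        have hlen : ((pref ++ [("img_line|" ++ f)]).length : Int) = (pref.length : Int) + 1 := by
          simp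
        rw [← hlen, ih fs' (pref ++ [("img_line|" ++ f)])]
        simp [pvCore]
    · simp only [List.filter_cons, beq_iff_eq, hx, if_false]
      have hlen : ((pref ++ [x]).length : Int) = (pref.length : Int) + 1 := by
        simp
      have := ih fs (pref ++ [x])
      rw [hlen] at this
      simp only [List.append_assoc, List.cons_append, List.nil_append] at this
      rw [this]
      simp [pvCore, hx]

-- ===== VERDICT (by name: the statement is the Claim_ definition above) =====
theorem replace_img_line_with_files_spec : Claim_equal_replace_img_line_with_files := by
  intro contentArr file_list _
  unfold Spec_replace_img_line_with_files replace_img_line_with_files replace_img_line_with_files_alt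
  rw [pvA_core file_list contentArr [] 0]
  have := pvB_core contentArr file_list []
  simp only [List.length_nil, Nat.cast_zero, List.nil_append] at this
  rw [this]
  simp
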